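-- pv_equiv track=rewrite | github.com/sauravbhattacharya001/sauravcode | sauravautomata.py | step_life
-- ===== SOURCE A (Python) =====
-- def step_life(grid):
--     h = len(grid)
--     w = len(grid[0])
--     new = [[0]*w for _ in range(h)]
--     births = deaths = 0
--     for r in range(h):
--         for c in range(w):
--             n = 0
--             for dr in (-1, 0, 1):
--                 for dc in (-1, 0, 1):
--                     if dr == 0 and dc == 0:
--                         continue
--                     nr, nc = (r + dr) % h, (c + dc) % w
--                     n += grid[nr][nc]
--             if grid[r][c]:
--                 if n in (2, 3):
--                     new[r][c] = 1
--                 else: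
--                     deaths += 1
--             else:
--                 if n == 3:
--                     new[r][c] = 1
--                     births += 1
--     return new, births, deaths
-- ===== SOURCE B (Python) =====
-- def step_life(grid):
--     h = len(grid)
--     w = len(grid[0])
--     counts = [[0] * w for _ in range(h)]
--     for dr in (-1, 0, 1):
--         for dc in (-1, 0, 1):
--             if dr == 0 and dc == 0:
--                 continue
--             for r in range(h):
--                 dst = counts[r]
--                 src = grid[(r + dr) % h]
--                 for c in range(w):
--                     dst[c] += src[(c + dc) % w]
--     new = [[1 if (counts[r][c] == 3 or (grid[r][c] and counts[r][c] == 2)) else 0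
--             for c in range(w)] for r in range(h)]
--     births = sum(1 for r in range(h) for c in range(w)
--                  if not grid[r][c] and counts[r][c] == 3)
--     deaths = sum(1 for r in range(h) for c in range(w)
--                  if grid[r][c] and counts[r][c] not in (2, 3))
--     return new, births, deaths
-- ===== Notes on version B (the rewrite author's own statement) =====
-- stated objective: alternative
-- what changed: B first materializes an h×w neighbor-count grid by accumulating the eight wrap-shifted copies of the grid (offset-major loops), then builds the new grid as a comprehension over the precomputed counts and computes births/deaths as two filtered sums; A recomputes the 8-neighbour sum inside each cell and updates all three results in one interleaved loop.
import Mathlib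
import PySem

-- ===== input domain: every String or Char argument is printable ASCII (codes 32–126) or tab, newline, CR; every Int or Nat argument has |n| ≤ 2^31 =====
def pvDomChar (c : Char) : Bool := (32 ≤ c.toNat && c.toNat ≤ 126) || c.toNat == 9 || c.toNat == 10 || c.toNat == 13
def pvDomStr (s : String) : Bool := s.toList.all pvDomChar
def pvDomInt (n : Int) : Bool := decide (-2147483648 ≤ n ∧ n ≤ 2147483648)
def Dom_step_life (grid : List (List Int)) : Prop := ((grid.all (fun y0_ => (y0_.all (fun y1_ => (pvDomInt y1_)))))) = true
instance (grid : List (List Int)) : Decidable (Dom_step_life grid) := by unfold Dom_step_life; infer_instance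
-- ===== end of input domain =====

-- One Game-of-Life step with toroidal wraparound, returning (new grid, births, deaths).
-- B first materializes the whole h×w neighbour-count grid (accumulating the eight
-- wrap-shifted copies of the grid, offset-major) and then builds the new grid as a
-- comprehension and births/deaths as two filtered sums; an alternative decomposition
-- of the same cost.

-- shared indexing expression grid[(r+dr)%h][(c+dc)%w] (both Pythons contain it verbatim)
def pvNbr (grid : List (List Int)) (h w : Nat) (r c : Nat) (dr dc : Int) : Int :=
  (grid.getD ((PySem.Int.mod ((r : Int) + dr) (h : Int)).toNat) []).getD
    ((PySem.Int.mod ((c : Int) + dc) (w : Int)).toNat) 0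

-- ===== PORT A =====
-- A's per-cell Conway branch block: alive = grid[r][c], n = neighbour count,
-- state = (row under construction, births, deaths)
def pvClass (alive n : Int) (st2 : List Int × Int × Int) : List Int × Int × Int :=
  if alive ≠ 0 then
    if n = 2 ∨ n = 3 then (st2.1 ++ [1], st2.2.1, st2.2.2) else (st2.1 ++ [0], st2.2.1, st2.2.2 + 1)
  else
    if n = 3 then (st2.1 ++ [1], st2.2.1 + 1, st2.2.2) else (st2.1 ++ [0], st2.2.1, st2.2.2)

def step_life (grid : List (List Int)) : List (List Int) × Int × Int :=
  let h := grid.length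
  let w := (grid.getD 0 []).length
  (List.range h).foldl (fun (st : List (List Int) × Int × Int) r =>
    (fun p : List Int × Int × Int => (st.1 ++ [p.1], p.2.1, p.2.2))
      ((List.range w).foldl (fun st2 c =>
        pvClass ((grid.getD r []).getD c 0)
          (([(-1 : Int), 0, 1]).foldl (fun n dr =>
            ([(-1 : Int), 0, 1]).foldl (fun n dc =>
              if dr = 0 ∧ dc = 0 then n else n + pvNbr grid h w r c dr dc) n) 0)
          st2)
        ([], st.2.1, st.2.2))) ([], 0, 0)

-- ===== PORT B =====
def step_life_alt (grid : List (List Int)) : List (List Int) × Int × Int :=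
  let h := grid.length
  let w := (grid.getD 0 []).length
  let counts := ([(-1 : Int), 0, 1]).foldl (fun cnt dr =>
    ([(-1 : Int), 0, 1]).foldl (fun cnt dc =>
      if dr = 0 ∧ dc = 0 then cnt
      else (List.range h).map (fun r =>
        (List.range w).map (fun c =>
          (cnt.getD r []).getD c 0 + pvNbr grid h w r c dr dc))) cnt)
    (List.replicate h (List.replicate w (0 : Int)))
  let new := (List.range h).map (fun r => (List.range w).map (fun c =>
    if (counts.getD r []).getD c 0 = 3 ∨
        ((grid.getD r []).getD c 0 ≠ 0 ∧ (counts.getD r []).getD c 0 = 2) then (1 : Int) else 0))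
  let births := (List.range h).foldl (fun b r => (List.range w).foldl (fun b c =>
    if (grid.getD r []).getD c 0 = 0 ∧ (counts.getD r []).getD c 0 = 3 then b + 1 else b) b) (0 : Int)
  let deaths := (List.range h).foldl (fun d r => (List.range w).foldl (fun d c =>
    if (grid.getD r []).getD c 0 ≠ 0 ∧
        ¬((counts.getD r []).getD c 0 = 2 ∨ (counts.getD r []).getD c 0 = 3) then d + 1 else d) d) (0 : Int)
  (new, births, deaths)

-- ===== PRECONDITION & SPEC =====
-- Pre_ excludes exactly where Python A raises IndexError: the empty grid (len(grid[0]))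
-- and ragged grids with some row shorter than row 0 (neighbour access walks off that row).
def Pre_step_life (grid : List (List Int)) : Prop :=
  grid ≠ [] ∧ ∀ row ∈ grid, (grid.getD 0 []).length ≤ row.length
instance (grid : List (List Int)) : Decidable (Pre_step_life grid) := by
  unfold Pre_step_life; infer_instance
def pvWitness_step_life : List (List Int) := [[1, 0], [0, 1]]
def Spec_step_life (grid : List (List Int)) (out : List (List Int) × Int × Int) : Prop := out = step_life_alt grid
instance (grid : List (List Int)) (out : List (List Int) × Int × Int) : Decidable (Spec_step_life grid out) := by unfold Spec_step_life; infer_instance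

-- ===== CLAIM (what is proved, stated in full; the proofs are below) =====
def Claim_equal_step_life : Prop := ∀ (grid : List (List Int)), Dom_step_life grid → Pre_step_life grid → Spec_step_life grid (step_life grid)

-- ===== LEMMAS AND PROOFS =====

theorem pv_foldl_congr_mem {α β : Type} (l : List α) (f g : β → α → β) (init : β)
    (h : ∀ acc x, x ∈ l → f acc x = g acc x) : l.foldl f init = l.foldl g init := by
  induction l generalizing init with
  | nil => rfl
  | cons a t ih =>
    simp only [List.foldl_cons]
    rw [h init a (by simp)]
    exact ih _ (fun acc x hx => h acc x (by simp [hx]))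

theorem pv_entry_map (f : Nat → Nat → Int) (h w r c : Nat) (hr : r < h) (hc : c < w) :
    ((((List.range h).map (fun r => (List.range w).map (fun c => f r c))).getD r []).getD c 0)
      = f r c := by
  simp [List.getD_eq_getElem?_getD, hr, hc]

theorem pv_entry_replicate (h w r c : Nat) :
    ((List.replicate h (List.replicate w (0 : Int))).getD r []).getD c 0 = 0 := by
  rcases Nat.lt_or_ge r h with hr | hr
  · rcases Nat.lt_or_ge c w with hc | hc
    · simp [List.getD_eq_getElem?_getD, hr, hc]
    · simp [List.getD_eq_getElem?_getD, hr,
        List.getElem?_eq_none (by simpa using hc : (List.replicate w (0 : Int)).length ≤ c)]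
  · simp [List.getD_eq_getElem?_getD,
      List.getElem?_eq_none (by simpa using hr : (List.replicate h (List.replicate w (0 : Int))).length ≤ r)]

-- entry of one inner (dc-)pass of B's accumulation equals the inner (dc-)fold of A's sum
theorem pv_inner_entry (grid : List (List Int)) (h w r c : Nat) (hr : r < h) (hc : c < w)
    (dr : Int) (L : List Int) (cnt : List (List Int)) (n : Int)
    (hbase : (cnt.getD r []).getD c 0 = n) :
    (((L.foldl (fun cnt dc =>
        if dr = 0 ∧ dc = 0 then cnt
        else (List.range h).map (fun r =>
          (List.range w).map (fun c =>
            (cnt.getD r []).getD c 0 + pvNbr grid h w r c dr dc))) cnt).getD r []).getD c 0)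
      = L.foldl (fun n dc => if dr = 0 ∧ dc = 0 then n else n + pvNbr grid h w r c dr dc) n := by
  induction L generalizing cnt n with
  | nil => simpa using hbase
  | cons dc t ih =>
    simp only [List.foldl_cons]
    by_cases hdc : dr = 0 ∧ dc = 0
    · rw [if_pos hdc, if_pos hdc]; exact ih cnt n hbase
    · rw [if_neg hdc, if_neg hdc]
      exact ih _ _ (by rw [pv_entry_map _ _ _ _ _ hr hc, hbase])

-- entry of B's full counts grid equals A's inline 8-neighbour sum
theorem pv_counts_entry (grid : List (List Int)) (h w r c : Nat) (hr : r < h) (hc : c < w)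
    (L : List Int) (cnt : List (List Int)) (n : Int)
    (hbase : (cnt.getD r []).getD c 0 = n) :
    (((L.foldl (fun cnt dr =>
        ([(-1 : Int), 0, 1]).foldl (fun cnt dc =>
          if dr = 0 ∧ dc = 0 then cnt
          else (List.range h).map (fun r =>
            (List.range w).map (fun c =>
              (cnt.getD r []).getD c 0 + pvNbr grid h w r c dr dc))) cnt) cnt).getD r []).getD c 0)
      = L.foldl (fun n dr =>
          ([(-1 : Int), 0, 1]).foldl (fun n dc =>
            if dr = 0 ∧ dc = 0 then n else n + pvNbr grid h w r c dr dc) n) n := by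
  induction L generalizing cnt n with
  | nil => simpa using hbase
  | cons dr t ih =>
    rw [List.foldl_cons, List.foldl_cons]
    exact ih _ _ (pv_inner_entry grid h w r c hr hc dr [(-1 : Int), 0, 1] cnt n hbase)

-- A's row fold, split into its three independent components
theorem pv_row (alive n : Nat → Int) (l : List Nat) (row0 : List Int) (b d : Int) :
    l.foldl (fun st2 c => pvClass (alive c) (n c) st2) (row0, b, d)
      = (row0 ++ l.map (fun c => if n c = 3 ∨ (alive c ≠ 0 ∧ n c = 2) then (1 : Int) else 0),
         l.foldl (fun b c => if alive c = 0 ∧ n c = 3 then b + 1 else b) b,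
         l.foldl (fun d c => if alive c ≠ 0 ∧ ¬(n c = 2 ∨ n c = 3) then d + 1 else d) d) := by
  induction l generalizing row0 b d with
  | nil => simp
  | cons c t ih =>
    simp only [List.foldl_cons, List.map_cons]
    by_cases ha : alive c = 0
    · by_cases h3 : n c = 3
      · rw [show pvClass (alive c) (n c) (row0, b, d) = (row0 ++ [1], b + 1, d) by
          simp [pvClass, ha, h3]]
        rw [ih]; simp [ha, h3]
      · rw [show pvClass (alive c) (n c) (row0, b, d) = (row0 ++ [0], b, d) by
          simp [pvClass, ha, h3]]
        rw [ih]; simp [ha, h3]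
    · by_cases h23 : n c = 2 ∨ n c = 3
      · rw [show pvClass (alive c) (n c) (row0, b, d) = (row0 ++ [1], b, d) by
          simp [pvClass, ha, h23]]
        rw [ih]
        rcases h23 with h2 | h3
        · simp [ha, h2]
        · simp [ha, h3]
      · rw [show pvClass (alive c) (n c) (row0, b, d) = (row0 ++ [0], b, d + 1) by
          simp [pvClass, ha, h23]]
        rw [ih]
        have h2 : ¬ n c = 2 := fun h => h23 (Or.inl h)
        have h3 : ¬ n c = 3 := fun h => h23 (Or.inr h)
        simp [ha, h2, h3]

-- A's whole fold, split into new grid / births / deaths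
theorem pv_outer (alive n : Nat → Nat → Int) (w : Nat) (l : List Nat)
    (rows0 : List (List Int)) (b d : Int) :
    l.foldl (fun (st : List (List Int) × Int × Int) r =>
      (fun p : List Int × Int × Int => (st.1 ++ [p.1], p.2.1, p.2.2))
        ((List.range w).foldl (fun st2 c => pvClass (alive r c) (n r c) st2)
          ([], st.2.1, st.2.2))) (rows0, b, d)
      = (rows0 ++ l.map (fun r => (List.range w).map (fun c =>
            if n r c = 3 ∨ (alive r c ≠ 0 ∧ n r c = 2) then (1 : Int) else 0)),
         l.foldl (fun b r => (List.range w).foldl (fun b c =>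
            if alive r c = 0 ∧ n r c = 3 then b + 1 else b) b) b,
         l.foldl (fun d r => (List.range w).foldl (fun d c =>
            if alive r c ≠ 0 ∧ ¬(n r c = 2 ∨ n r c = 3) then d + 1 else d) d) d) := by
  induction l generalizing rows0 b d with
  | nil => simp
  | cons r t ih =>
    simp only [List.foldl_cons, List.map_cons]
    rw [pv_row (alive r) (n r) (List.range w) [] b d]
    rw [ih]
    simp

-- ===== VERDICT (by name: the statement is the Claim_ definition above) =====
theorem step_life_spec : Claim_equal_step_life := by
  intro grid _ _
  unfold Spec_step_life step_life step_life_alt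
  simp only []
  have houter := pv_outer
    (fun r c => (grid.getD r []).getD c 0)
    (fun r c => ([(-1 : Int), 0, 1]).foldl (fun n dr =>
      ([(-1 : Int), 0, 1]).foldl (fun n dc =>
        if dr = 0 ∧ dc = 0 then n
        else n + pvNbr grid grid.length (grid.getD 0 []).length r c dr dc) n) 0)
    (grid.getD 0 []).length (List.range grid.length) [] 0 0
  simp only [] at houter
  rw [houter]
  simp only [List.nil_append, Prod.mk.injEq]
  refine ⟨?_, ?_, ?_⟩
  · apply List.map_congr_left
    intro r hr
    apply List.map_congr_left
    intro c hc
    rw [pv_counts_entry grid _ _ r c (List.mem_range.mp hr) (List.mem_range.mp hc)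
      [(-1 : Int), 0, 1] _ 0 (pv_entry_replicate _ _ _ _)]
  · apply pv_foldl_congr_mem
    intro b r hr
    apply pv_foldl_congr_mem
    intro b' c hc
    rw [pv_counts_entry grid _ _ r c (List.mem_range.mp hr) (List.mem_range.mp hc)
      [(-1 : Int), 0, 1] _ 0 (pv_entry_replicate _ _ _ _)]
  · apply pv_foldl_congr_mem
    intro d r hr
    apply pv_foldl_congr_mem
    intro d' c hc
    rw [pv_counts_entry grid _ _ r c (List.mem_range.mp hr) (List.mem_range.mp hc)
      [(-1 : Int), 0, 1] _ 0 (pv_entry_replicate _ _ _ _)]
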